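-- pv_equiv track=rewrite | github.com/Talen-520/Advanced-Python-Programming | part7.py | monitor
-- ===== SOURCE A (Python) =====
-- def monitor(n):
--   gap = 0
--   for i in range (len(n)):
--     if n[i] == 0:
--       gap+=1
--
--     else:#n[i]==1
--       yield gap
--       gap = 0
-- ===== SOURCE B (Python) =====
-- def monitor(n):
--     # Stage 1: collect the indices of all non-zero elements.
--     idxs = [i for i in range(len(n)) if n[i] != 0]
--     # Stage 2: each gap is the distance between consecutive non-zero indices.
--     for prev, cur in zip([-1] + idxs, idxs):
--         yield cur - prev - 1
-- ===== Notes on version B (the rewrite author's own statement) =====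
-- stated objective: alternative
-- what changed: Two-stage decomposition: first builds the list of indices of non-zero elements, then yields pairwise differences of consecutive indices (with -1 prepended), instead of A's single pass with a per-zero reset counter.
import Mathlib
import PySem

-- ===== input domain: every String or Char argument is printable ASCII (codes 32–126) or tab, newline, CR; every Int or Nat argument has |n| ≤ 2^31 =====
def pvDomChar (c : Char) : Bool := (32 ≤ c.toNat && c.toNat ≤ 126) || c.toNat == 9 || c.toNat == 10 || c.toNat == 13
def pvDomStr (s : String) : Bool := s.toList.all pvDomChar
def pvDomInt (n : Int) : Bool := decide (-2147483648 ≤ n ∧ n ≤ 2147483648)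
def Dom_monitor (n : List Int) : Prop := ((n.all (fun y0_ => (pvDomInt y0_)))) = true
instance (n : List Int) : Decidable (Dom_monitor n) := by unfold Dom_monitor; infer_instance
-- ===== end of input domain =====

-- B is a two-stage decomposition: collect the indices of non-zero elements, then
-- emit pairwise differences of consecutive indices (with -1 prepended), replacing
-- A's single pass with a per-zero reset counter. Equivalence proved for all inputs.
-- Note: A is a lazy generator while B materialises the index list; only the
-- sequence of yielded values is claimed equal.

-- ===== PORT A =====
-- A's loop over range(len(n)) reads each element in order with accumulator gap.
def monitorGo (gap : Int) : List Int → List Int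
  | [] => []
  | x :: xs => if x == 0 then monitorGo (gap + 1) xs else gap :: monitorGo 0 xs

def monitor (n : List Int) : List Int := monitorGo 0 n

-- ===== PORT B =====
-- Stage 1: the comprehension [i for i in range(len(n)) if n[i] != 0].
def monitorAltIdxs (i : Int) : List Int → List Int
  | [] => []
  | x :: xs => if x != 0 then i :: monitorAltIdxs (i + 1) xs else monitorAltIdxs (i + 1) xs

-- Stage 2: zip([-1] + idxs, idxs) with cur - prev - 1.
def monitor_alt (n : List Int) : List Int :=
  let idxs := monitorAltIdxs 0 n
  List.zipWith (fun prev cur => cur - prev - 1) ((-1) :: idxs) idxs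

-- ===== PRECONDITION & SPEC =====
def Spec_monitor (n : List Int) (out : List Int) : Prop := out = monitor_alt n
instance (n : List Int) (out : List Int) : Decidable (Spec_monitor n out) := by unfold Spec_monitor; infer_instance

-- ===== CLAIM =====
def Claim_equal_monitor : Prop := ∀ (n : List Int), Dom_monitor n → Spec_monitor n (monitor n)

-- ===== LEMMAS AND PROOFS =====
-- Invariant: the pairwise differences of (prev :: idxs) against idxs equal A's
-- output when A's running gap is i - prev - 1.
theorem zip_idxs_eq_go (xs : List Int) : ∀ (i prev : Int),
    List.zipWith (fun p c => c - p - 1) (prev :: monitorAltIdxs i xs) (monitorAltIdxs i xs)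
      = monitorGo (i - prev - 1) xs := by
  induction xs with
  | nil => intro i prev; rfl
  | cons x xs ih =>
    intro i prev
    simp only [monitorGo, monitorAltIdxs]
    by_cases hx : x = 0
    · simp only [hx, bne_self_eq_false, Bool.false_eq_true, if_false, BEq.rfl, if_true]
      rw [ih (i + 1) prev, show i + 1 - prev - 1 = i - prev - 1 + 1 from by omega]
    · rw [if_pos (by simpa using hx), if_neg (by simpa using hx)]
      simp only [List.zipWith]
      rw [ih (i + 1) i, show i + 1 - i - 1 = 0 from by omega]

-- ===== VERDICT =====
theorem monitor_spec : Claim_equal_monitor := by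
  intro n _
  unfold Spec_monitor monitor monitor_alt
  have := zip_idxs_eq_go n 0 (-1)
  simpa using this.symm
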